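-- pv_equiv track=rewrite | github.com/hihellosj/Algorithm | 백준/Gold/14502. 연구소/연구소.py | solve
-- ===== SOURCE A (Python) =====
-- from collections import deque
--
-- dx = [-1, 1, 0, 0]
--
-- dy = [0, 0, -1, 1]
--
-- def bfs(grid, N, M):
--     # 바이러스 확산을 위한 BFS
--     visited = [[False] * M for _ in range(N)]
--     queue = deque()
--
--     # 바이러스가 있는 위치 큐에 넣기
--     for i in range(N):
--         for j in range(M):
--             if grid[i][j] == 2:
--                 queue.append((i, j))
--                 visited[i][j] = True
--
--     while queue:
--         x, y = queue.popleft()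
--
--         # 상하좌우로 퍼지기
--         for i in range(4):
--             nx, ny = x + dx[i], y + dy[i]
--             if 0 <= nx < N and 0 <= ny < M and not visited[nx][ny]:
--                 if grid[nx][ny] == 0:  # 빈 칸인 경우만
--                     visited[nx][ny] = True
--                     queue.append((nx, ny))
--
--     # 안전 영역의 크기 계산
--     safe_area = 0
--     for i in range(N):
--         for j in range(M):
--             if grid[i][j] == 0 and not visited[i][j]:  # 빈 칸 중 방문하지 않은 곳
--                 safe_area += 1
--     return safe_area
--
-- def solve(N, M, grid):
--     # 빈 칸을 저장
--     empty_spaces = []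
--
--     for i in range(N):
--         for j in range(M):
--             if grid[i][j] == 0:
--                 empty_spaces.append((i, j))
--
--     # 벽을 3개 세우는 모든 조합 구하기
--     max_safe_area = 0
--     # 3개의 벽을 세울 수 있는 조합을 찾기 위한 반복문
--     for i in range(len(empty_spaces)):
--         for j in range(i + 1, len(empty_spaces)):
--             for k in range(j + 1, len(empty_spaces)):
--                 # 3개의 벽을 세운 새로운 grid 생성
--                 new_grid = [row[:] for row in grid]
--                 new_grid[empty_spaces[i][0]][empty_spaces[i][1]] = 1
--                 new_grid[empty_spaces[j][0]][empty_spaces[j][1]] = 1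
--                 new_grid[empty_spaces[k][0]][empty_spaces[k][1]] = 1
--
--                 # 바이러스 확산 후 안전 영역 계산
--                 max_safe_area = max(max_safe_area, bfs(new_grid, N, M))
--
--     return max_safe_area
-- ===== SOURCE B (Python) =====
-- def solve(N, M, grid):
--     # Flat enumeration of empties; recursive backtracking over wall triples;
--     # spread uses a head-index queue over a visited *set* of positions and
--     # never copies the grid (walls passed as a set).
--     empties = [(i, j) for i in range(N) for j in range(M) if grid[i][j] == 0]
--
--     def spread(walls):
--         seen = set()
--         queue = []
--         for i in range(N):
--             for j in range(M):
--                 if grid[i][j] == 2: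
--                     queue.append((i, j))
--                     seen.add((i, j))
--         head = 0
--         while head < len(queue):
--             x, y = queue[head]
--             head += 1
--             for q in ((x - 1, y), (x + 1, y), (x, y - 1), (x, y + 1)):
--                 if 0 <= q[0] < N and 0 <= q[1] < M and q not in seen:
--                     if grid[q[0]][q[1]] == 0 and q not in walls:
--                         seen.add(q)
--                         queue.append(q)
--         safe = 0
--         for i in range(N):
--             for j in range(M):
--                 if grid[i][j] == 0 and (i, j) not in walls and (i, j) not in seen:
--                     safe += 1
--         return safe
--
--     def best_from(need, spaces, walls):
--         if need == 0:
--             return spread(walls)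
--         b = 0
--         for t in range(len(spaces)):
--             b = max(b, best_from(need - 1, spaces[t + 1:], walls | {spaces[t]}))
--         return b
--
--     return best_from(3, empties, set())
-- ===== Notes on version B (the rewrite author's own statement) =====
-- stated objective: alternative
-- what changed: A's three nested index loops that copy the whole grid and write 3 walls into it per combination are replaced by a recursive backtracking enumeration over wall sets that never writes the grid: walls live in a set, the spread tracks visited cells in a set of positions with a head-index queue, and the safe count excludes walls by set membership.
import Mathlib
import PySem

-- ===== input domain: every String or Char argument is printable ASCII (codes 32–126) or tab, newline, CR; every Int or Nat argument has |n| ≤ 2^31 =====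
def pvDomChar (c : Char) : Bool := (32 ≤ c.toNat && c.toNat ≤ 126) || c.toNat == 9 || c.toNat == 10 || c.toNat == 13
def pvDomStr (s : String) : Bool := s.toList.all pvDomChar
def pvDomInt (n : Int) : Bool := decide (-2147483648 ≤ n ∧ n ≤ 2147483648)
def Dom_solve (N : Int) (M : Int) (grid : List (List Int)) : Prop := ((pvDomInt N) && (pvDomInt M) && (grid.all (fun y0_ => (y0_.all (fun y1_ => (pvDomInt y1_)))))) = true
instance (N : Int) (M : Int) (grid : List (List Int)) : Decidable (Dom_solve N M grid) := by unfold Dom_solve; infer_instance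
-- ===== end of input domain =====

-- B re-decomposes A: instead of three nested index loops each building a fresh 3-wall grid copy,
-- B backtracks recursively over wall sets and runs the spread against the ORIGINAL grid with the
-- walls held in a set, tracking visited cells in a set of positions (objective: alternative, not faster).


-- ===== PORT A =====
def dxs : List Int := [-1, 1, 0, 0]
def dys : List Int := [0, 0, -1, 1]

-- grid[i][j] for indices that are nonneg and in range at every use site (guarded / Pre_)
def getCell (g : List (List Int)) (i j : Int) : Int := (g.getD i.toNat []).getD j.toNat 0

-- grid[i][j] = v (indices nonneg and in range at every use site)
def setCell (g : List (List Int)) (i j : Int) (v : Int) : List (List Int) :=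
  g.modify i.toNat (fun row => row.set j.toNat v)

def getVis (v : List (List Bool)) (i j : Int) : Bool := (v.getD i.toNat []).getD j.toNat false

def setVis (v : List (List Bool)) (i j : Int) : List (List Bool) :=
  v.modify i.toNat (fun row => row.set j.toNat true)

-- the 'while queue:' loop; fuel N*M bounds the number of pops (each enqueue marks a fresh cell
-- visited, so at most N*M enqueues ever happen and the fuel is never exhausted)
def bfsLoop (N M : Int) (grid : List (List Int)) :
    Nat → List (Int × Int) → List (List Bool) → List (List Bool)
  | 0, _, vis => vis
  | _ + 1, [], vis => vis
  | f + 1, (x, y) :: rest, vis =>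
    let st := (List.range 4).foldl (fun (st : List (Int × Int) × List (List Bool)) i =>
      let nx := x + dxs.getD i 0
      let ny := y + dys.getD i 0
      if 0 ≤ nx ∧ nx < N ∧ 0 ≤ ny ∧ ny < M ∧ getVis st.2 nx ny = false then
        if getCell grid nx ny = 0 then (st.1 ++ [(nx, ny)], setVis st.2 nx ny) else st
      else st) (rest, vis)
    bfsLoop N M grid f st.1 st.2

-- bfs(grid, N, M) of Source A
def bfs (grid : List (List Int)) (N M : Int) : Int :=
  let vis0 := List.replicate N.toNat (List.replicate M.toNat false)
  let init := (List.range N.toNat).foldl (fun (st : List (Int × Int) × List (List Bool)) (i : Nat) =>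
    (List.range M.toNat).foldl (fun st (j : Nat) =>
      if getCell grid (i : Int) (j : Int) = 2 then
        (st.1 ++ [((i : Int), (j : Int))], setVis st.2 (i : Int) (j : Int))
      else st) st) ([], vis0)
  let vis := bfsLoop N M grid (N.toNat * M.toNat) init.1 init.2
  (List.range N.toNat).foldl (fun a (i : Nat) =>
    (List.range M.toNat).foldl (fun a (j : Nat) =>
      if getCell grid (i : Int) (j : Int) = 0 ∧ getVis vis (i : Int) (j : Int) = false then a + 1
      else a) a) 0

-- the empty-cell scan of Source A's solve
def collectEmpties (N M : Int) (grid : List (List Int)) : List (Int × Int) :=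
  (List.range N.toNat).foldl (fun acc (i : Nat) =>
    (List.range M.toNat).foldl (fun acc (j : Nat) =>
      if getCell grid (i : Int) (j : Int) = 0 then acc ++ [((i : Int), (j : Int))] else acc) acc) []

-- solve of Source A: three nested index loops over the empty cells, a fresh 3-wall grid per triple
def solve (N : Int) (M : Int) (grid : List (List Int)) : Int :=
  let es := collectEmpties N M grid
  let L := es.length
  (List.range L).foldl (fun acc i =>
    (List.range' (i + 1) (L - (i + 1))).foldl (fun acc j =>
      (List.range' (j + 1) (L - (j + 1))).foldl (fun acc k =>
        let p1 := es.getD i (0, 0)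
        let p2 := es.getD j (0, 0)
        let p3 := es.getD k (0, 0)
        let ng := setCell (setCell (setCell grid p1.1 p1.2 1) p2.1 p2.2 1) p3.1 p3.2 1
        max acc (bfs ng N M)) acc) acc) 0

-- ===== PORT B =====
-- B never copies or writes the grid: walls live in a set, visited cells in a set of positions.
-- (grid cell reads go through the same accessor getCell as in port A)

-- the four neighbour positions of Source B's generator expression
def nbrsB (x y : Int) : List (Int × Int) := [(x - 1, y), (x + 1, y), (x, y - 1), (x, y + 1)]

-- the 'while head < len(queue):' loop of Source B's spread (head-index queue; fuel as in bfsLoop)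
def spreadLoop (N M : Int) (grid : List (List Int)) (walls : List (Int × Int)) :
    Nat → List (Int × Int) → PySem.Set (Int × Int) → PySem.Set (Int × Int)
  | 0, _, seen => seen
  | _ + 1, [], seen => seen
  | f + 1, (x, y) :: rest, seen =>
    let st := (nbrsB x y).foldl (fun (st : List (Int × Int) × PySem.Set (Int × Int)) q =>
      if 0 ≤ q.1 ∧ q.1 < N ∧ 0 ≤ q.2 ∧ q.2 < M ∧ st.2.contains q = false then
        if getCell grid q.1 q.2 = 0 ∧ walls.contains q = false then
          (st.1 ++ [q], PySem.Set.add st.2 q)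
        else st
      else st) (rest, seen)
    spreadLoop N M grid walls f st.1 st.2

-- spread(walls) of Source B
def spreadB (N M : Int) (grid : List (List Int)) (walls : PySem.Set (Int × Int)) : Int :=
  let init := (PySem.List.pyRange 0 N 1).foldl (fun (st : List (Int × Int) × PySem.Set (Int × Int)) i =>
    (PySem.List.pyRange 0 M 1).foldl (fun st j =>
      if getCell grid i j = 2 then (st.1 ++ [(i, j)], PySem.Set.add st.2 (i, j)) else st) st)
    ([], PySem.Set.empty)
  let seen := spreadLoop N M grid walls (N.toNat * M.toNat) init.1 init.2
  (PySem.List.pyRange 0 N 1).foldl (fun a i =>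
    (PySem.List.pyRange 0 M 1).foldl (fun a j =>
      if getCell grid i j = 0 ∧ walls.contains (i, j) = false ∧ seen.contains (i, j) = false
      then a + 1 else a) a) 0

-- best_from(need, spaces, walls) of Source B: backtracking over the remaining empty cells
mutual
def bestFrom (N M : Int) (grid : List (List Int)) : Nat → List (Int × Int) → PySem.Set (Int × Int) → Int
  | 0, _, walls => spreadB N M grid walls
  | n + 1, spaces, walls => bestLoop N M grid n walls spaces 0
termination_by n spaces _ => (n, spaces.length)

def bestLoop (N M : Int) (grid : List (List Int)) (n : Nat) (walls : PySem.Set (Int × Int)) :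
    List (Int × Int) → Int → Int
  | [], b => b
  | p :: rest, b =>
    bestLoop N M grid n walls rest (max b (bestFrom N M grid n rest (PySem.Set.add walls p)))
termination_by spaces _ => (n, spaces.length)
end

def solve_alt (N : Int) (M : Int) (grid : List (List Int)) : Int :=
  let empties := (PySem.List.pyRange 0 N 1).flatMap (fun i =>
    (PySem.List.pyRange 0 M 1).filterMap (fun j =>
      if getCell grid i j = 0 then some (i, j) else none))
  bestFrom N M grid 3 empties PySem.Set.empty

-- ===== PRECONDITION & SPEC =====
-- Pre_ excludes exactly the inputs on which the Python raises IndexError: M > 0 (so the column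
-- loops actually index the grid) together with fewer than N rows, or a row among the first N
-- shorter than M.
def Pre_solve (N : Int) (M : Int) (grid : List (List Int)) : Prop :=
  M ≤ 0 ∨ (N ≤ (grid.length : Int) ∧ ∀ row ∈ grid.take N.toNat, M ≤ (row.length : Int))
instance (N : Int) (M : Int) (grid : List (List Int)) : Decidable (Pre_solve N M grid) := by unfold Pre_solve; infer_instance

def pvWitness_solve : Int × Int × List (List Int) := (2, 2, [[2, 0], [0, 0]])

def Spec_solve (N : Int) (M : Int) (grid : List (List Int)) (out : Int) : Prop := out = solve_alt N M grid
instance (N : Int) (M : Int) (grid : List (List Int)) (out : Int) : Decidable (Spec_solve N M grid out) := by unfold Spec_solve; infer_instance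

-- ===== CLAIM (what is proved, stated in full; the proofs are below) =====
def Claim_equal_solve : Prop := ∀ (N : Int) (M : Int) (grid : List (List Int)), Dom_solve N M grid → Pre_solve N M grid → Spec_solve N M grid (solve N M grid)

-- ===== LEMMAS AND PROOFS =====

-- ----- proof-only helpers: cell-level facts -----

-- the rows Source A actually touches exist and are long enough (consequence of Pre_)
def Rect (N M : Int) (g : List (List Int)) : Prop :=
  N.toNat ≤ g.length ∧ ∀ k, k < N.toNat → M.toNat ≤ (g.getD k []).length

-- an in-range position
def PIn (N M : Int) (p : Int × Int) : Prop := 0 ≤ p.1 ∧ p.1 < N ∧ 0 ≤ p.2 ∧ p.2 < M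

theorem Rect_of_pre (N M : Int) (grid : List (List Int)) (h : Pre_solve N M grid) (hM : 0 < M) :
    Rect N M grid := by
  obtain ⟨h1, h2⟩ := h.resolve_left (by omega)
  refine ⟨by omega, fun k hk => ?_⟩
  have hkl : k < grid.length := by omega
  have hmem : grid.getD k [] ∈ grid.take N.toNat := by
    rw [List.getD_eq_getElem grid [] hkl]
    have : (grid.take N.toNat)[k]'(by simp; omega) = grid[k] := List.getElem_take
    rw [← this]
    exact List.getElem_mem _
  have := h2 _ hmem
  omega

-- one matrix write, read back anywhere (Nat indices)
theorem set2 {α : Type} (g : List (List α)) (a b : Nat) (hal : a < g.length)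
    (hbl : b < (g.getD a []).length) (i j : Nat) (v d : α) :
    ((g.modify a (fun r => r.set b v)).getD i []).getD j d
      = if i = a ∧ j = b then v else (g.getD i []).getD j d := by
  rw [List.getD_eq_getElem g [] hal] at hbl
  simp only [List.getD_eq_getElem?_getD]
  rw [List.getElem?_modify]
  by_cases hia : i = a
  · subst hia
    simp only [List.getElem?_eq_getElem hal, true_and]
    show ((some (g[i].set b v)).getD [])[j]?.getD d = _
    simp only [Option.getD_some]
    rw [List.getElem?_set]
    by_cases hjb : j = b
    · subst hjb
      simp [hbl]
    · simp [hjb, Ne.symm hjb]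
  · have h1 : ¬ (i = a ∧ j = b) := fun h => hia h.1
    simp only [if_neg h1]
    cases hgi : g[i]? with
    | none => simp
    | some r => simp [if_neg (fun h : a = i => hia h.symm)]

-- a matrix write never changes any row length
theorem len2 {α : Type} (g : List (List α)) (a b : Nat) (v : α) (k : Nat) :
    ((g.modify a (fun r => r.set b v)).getD k []).length = (g.getD k []).length := by
  simp only [List.getD_eq_getElem?_getD]
  rw [List.getElem?_modify]
  cases hgk : g[k]? with
  | none => simp
  | some r => by_cases h : a = k <;> simp [h]

theorem contains_add {α : Type} [BEq α] [LawfulBEq α] (s : List α) (x y : α) :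
    List.contains (PySem.Set.add s x) y = (List.contains s y || y == x) := by
  by_cases h : y ∈ PySem.Set.add s x
  · have := (PySem.Set.mem_add s x y).mp h
    cases this with
    | inl h2 => simp [h, h2]
    | inr h2 => simp [h, h2]
  · have h1 : y ∉ s := fun hh => h ((PySem.Set.mem_add s x y).mpr (Or.inl hh))
    have h2 : y ≠ x := fun hh => h ((PySem.Set.mem_add s x y).mpr (Or.inr hh))
    simp [List.contains_iff_mem, h, h1, h2]

theorem getCell_setCell (N M : Int) (g : List (List Int)) (hR : Rect N M g)
    (a b : Int) (hab : PIn N M (a, b)) (i j : Int) (hi : 0 ≤ i) (hj : 0 ≤ j) (v : Int) :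
    getCell (setCell g a b v) i j = if i = a ∧ j = b then v else getCell g i j := by
  obtain ⟨ha0, haN, hb0, hbM⟩ := hab
  obtain ⟨hlen, hrow⟩ := hR
  have hal : a.toNat < g.length := by omega
  have hbl : b.toNat < (g.getD a.toNat []).length := by
    have := hrow a.toNat (by omega); omega
  simp only [getCell, setCell]
  rw [set2 g a.toNat b.toNat hal hbl i.toNat j.toNat v 0]
  by_cases hc : i = a ∧ j = b
  · rw [if_pos hc, if_pos (by omega)]
  · rw [if_neg hc, if_neg (by omega)]

theorem Rect_setCell (N M : Int) (g : List (List Int)) (hR : Rect N M g) (a b v : Int) :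
    Rect N M (setCell g a b v) := by
  obtain ⟨hlen, hrow⟩ := hR
  refine ⟨by simpa [setCell] using hlen, fun k hk => ?_⟩
  have := hrow k hk
  simp only [setCell]
  rw [len2]
  exact this

-- A's three setCell writes as a fold, so the wall list can be reasoned about uniformly
def stack (L : List (Int × Int)) (g : List (List Int)) : List (List Int) :=
  L.foldl (fun g w => setCell g w.1 w.2 1) g

theorem getCell_stack (N M : Int) (L : List (Int × Int)) :
    ∀ (g : List (List Int)), Rect N M g → (∀ w ∈ L, PIn N M w) →
    ∀ i j : Int, 0 ≤ i → 0 ≤ j →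
      getCell (stack L g) i j = if (i, j) ∈ L then 1 else getCell g i j := by
  induction L with
  | nil => intro g _ _ i j _ _; simp [stack]
  | cons w L ih =>
    intro g hR hL i j hi hj
    have hw := hL w (by simp)
    have hstep : stack (w :: L) g = stack L (setCell g w.1 w.2 1) := rfl
    rw [hstep, ih _ (Rect_setCell N M g hR w.1 w.2 1) (fun x hx => hL x (by simp [hx])) i j hi hj]
    rw [getCell_setCell N M g hR w.1 w.2 hw i j hi hj 1]
    have hiff : (i, j) = w ↔ i = w.1 ∧ j = w.2 := by
      constructor
      · intro h; rw [← h]; exact ⟨rfl, rfl⟩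
      · intro ⟨h1, h2⟩; rw [Prod.ext_iff]; exact ⟨h1, h2⟩
    by_cases h1 : (i, j) ∈ L
    · simp [h1]
    · by_cases h2 : (i, j) = w <;> simp [h1, h2, ← hiff]

-- ----- the visited-matrix / visited-set simulation -----

-- B's seen-set agrees with A's visited matrix on every in-range cell (and the matrix keeps its shape)
def VRel (N M : Int) (vis : List (List Bool)) (seen : List (Int × Int)) : Prop :=
  vis.length = N.toNat ∧ (∀ k, k < N.toNat → (vis.getD k []).length = M.toNat) ∧
  ∀ i j : Int, 0 ≤ i → i < N → 0 ≤ j → j < M → getVis vis i j = seen.contains (i, j)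

theorem Rel_empty (N M : Int) :
    VRel N M (List.replicate N.toNat (List.replicate M.toNat false)) [] := by
  refine ⟨by simp, fun k hk => ?_, fun i j hi hiN hj hjM => ?_⟩
  · simp [List.getD_eq_getElem?_getD, List.getElem?_replicate, hk]
  · have hk : i.toNat < N.toNat := by omega
    simp only [getVis, List.getD_eq_getElem?_getD, List.getElem?_replicate]
    split_ifs <;> simp

theorem Rel_add (N M : Int) (vis : List (List Bool)) (seen : List (Int × Int))
    (h : VRel N M vis seen) (a b : Int) (ha : 0 ≤ a) (haN : a < N) (hb : 0 ≤ b) (hbM : b < M) :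
    VRel N M (setVis vis a b) (PySem.Set.add seen (a, b)) := by
  obtain ⟨hlen, hrow, hpt⟩ := h
  have hal : a.toNat < vis.length := by omega
  have hbl : b.toNat < (vis.getD a.toNat []).length := by
    have := hrow a.toNat (by omega); omega
  refine ⟨by simpa [setVis] using hlen, fun k hk => ?_, fun i j hi hiN hj hjM => ?_⟩
  · have := hrow k hk
    simp only [setVis]
    rw [len2]
    exact this
  · simp only [getVis, setVis]
    rw [set2 vis a.toNat b.toNat hal hbl i.toNat j.toNat true false]
    rw [contains_add]
    by_cases hc : i = a ∧ j = b
    · have : (i, j) = (a, b) := by rw [Prod.ext_iff]; exact ⟨hc.1, hc.2⟩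
      rw [if_pos (by omega)]
      simp [this]
    · have hne : ¬ ((i, j) = (a, b)) := by
        rw [Prod.ext_iff]; tauto
      rw [if_neg (by omega)]
      have hv := hpt i j hi hiN hj hjM
      simp only [getVis] at hv
      rw [hv]
      simp [hne]

-- ----- BFS-step simulation -----

-- one neighbour step of Source A's inner loop
def stepA (N M : Int) (ng : List (List Int)) (st : List (Int × Int) × List (List Bool))
    (nx ny : Int) : List (Int × Int) × List (List Bool) :=
  if 0 ≤ nx ∧ nx < N ∧ 0 ≤ ny ∧ ny < M ∧ getVis st.2 nx ny = false then
    if getCell ng nx ny = 0 then (st.1 ++ [(nx, ny)], setVis st.2 nx ny) else st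
  else st

-- one neighbour step of Source B's inner loop
def stepB (N M : Int) (grid : List (List Int)) (W : List (Int × Int))
    (st : List (Int × Int) × PySem.Set (Int × Int)) (q : Int × Int) :
    List (Int × Int) × PySem.Set (Int × Int) :=
  if 0 ≤ q.1 ∧ q.1 < N ∧ 0 ≤ q.2 ∧ q.2 < M ∧ st.2.contains q = false then
    if getCell grid q.1 q.2 = 0 ∧ W.contains q = false then (st.1 ++ [q], PySem.Set.add st.2 q)
    else st
  else st

theorem foldA_eq (N M : Int) (ng : List (List Int)) (x y : Int)
    (st : List (Int × Int) × List (List Bool)) :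
    (List.range 4).foldl (fun (st : List (Int × Int) × List (List Bool)) i =>
      let nx := x + dxs.getD i 0
      let ny := y + dys.getD i 0
      if 0 ≤ nx ∧ nx < N ∧ 0 ≤ ny ∧ ny < M ∧ getVis st.2 nx ny = false then
        if getCell ng nx ny = 0 then (st.1 ++ [(nx, ny)], setVis st.2 nx ny) else st
      else st) st
    = stepA N M ng (stepA N M ng (stepA N M ng (stepA N M ng st (x + -1) (y + 0))
        (x + 1) (y + 0)) (x + 0) (y + -1)) (x + 0) (y + 1) := rfl

theorem foldB_eq (N M : Int) (grid : List (List Int)) (W : List (Int × Int)) (x y : Int)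
    (st : List (Int × Int) × PySem.Set (Int × Int)) :
    (nbrsB x y).foldl (fun (st : List (Int × Int) × PySem.Set (Int × Int)) q =>
      if 0 ≤ q.1 ∧ q.1 < N ∧ 0 ≤ q.2 ∧ q.2 < M ∧ st.2.contains q = false then
        if getCell grid q.1 q.2 = 0 ∧ W.contains q = false then (st.1 ++ [q], PySem.Set.add st.2 q)
        else st
      else st) st
    = stepB N M grid W (stepB N M grid W (stepB N M grid W (stepB N M grid W st (x - 1, y))
        (x + 1, y)) (x, y - 1)) (x, y + 1) := rfl

theorem step_sim (N M : Int) (ng grid : List (List Int)) (W : List (Int × Int))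
    (h0 : ∀ i j : Int, 0 ≤ i → 0 ≤ j →
      (getCell ng i j = 0 ↔ (getCell grid i j = 0 ∧ List.contains W (i, j) = false)))
    (stA : List (Int × Int) × List (List Bool)) (stB : List (Int × Int) × PySem.Set (Int × Int))
    (hq : stA.1 = stB.1) (hrel : VRel N M stA.2 stB.2) (nx ny nx' ny' : Int)
    (hx : nx = nx') (hy : ny = ny') :
    (stepA N M ng stA nx ny).1 = (stepB N M grid W stB (nx', ny')).1 ∧
      VRel N M (stepA N M ng stA nx ny).2 (stepB N M grid W stB (nx', ny')).2 := by
  subst hx hy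
  unfold stepA stepB
  simp only [PySem.Set.contains]
  by_cases hr : 0 ≤ nx ∧ nx < N ∧ 0 ≤ ny ∧ ny < M
  · obtain ⟨h1, h2', h3, h4⟩ := hr
    have hvis : getVis stA.2 nx ny = List.contains stB.2 (nx, ny) := hrel.2.2 nx ny h1 h2' h3 h4
    by_cases hv : getVis stA.2 nx ny = false
    · have hcA : 0 ≤ nx ∧ nx < N ∧ 0 ≤ ny ∧ ny < M ∧ getVis stA.2 nx ny = false :=
        ⟨h1, h2', h3, h4, hv⟩
      have hcB : 0 ≤ nx ∧ nx < N ∧ 0 ≤ ny ∧ ny < M ∧ List.contains stB.2 (nx, ny) = false :=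
        ⟨h1, h2', h3, h4, by rw [← hvis]; exact hv⟩
      rw [if_pos hcA, if_pos hcB]
      by_cases hc : getCell ng nx ny = 0
      · rw [if_pos hc, if_pos ((h0 nx ny h1 h3).mp hc)]
        exact ⟨by simp [hq], Rel_add N M stA.2 stB.2 hrel nx ny h1 h2' h3 h4⟩
      · rw [if_neg hc, if_neg (fun hcb => hc ((h0 nx ny h1 h3).mpr hcb))]
        exact ⟨hq, hrel⟩
    · rw [if_neg (fun h => hv h.2.2.2.2), if_neg (fun h => hv (by rw [hvis]; exact h.2.2.2.2))]
      exact ⟨hq, hrel⟩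
  · rw [if_neg (fun h => hr ⟨h.1, h.2.1, h.2.2.1, h.2.2.2.1⟩),
        if_neg (fun h => hr ⟨h.1, h.2.1, h.2.2.1, h.2.2.2.1⟩)]
    exact ⟨hq, hrel⟩

theorem loop_sim (N M : Int) (ng grid : List (List Int)) (W : List (Int × Int))
    (h0 : ∀ i j : Int, 0 ≤ i → 0 ≤ j →
      (getCell ng i j = 0 ↔ (getCell grid i j = 0 ∧ List.contains W (i, j) = false))) :
    ∀ (f : Nat) (q : List (Int × Int)) (vis : List (List Bool)) (seen : PySem.Set (Int × Int)),
      VRel N M vis seen →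
      VRel N M (bfsLoop N M ng f q vis) (spreadLoop N M grid W f q seen) := by
  intro f
  induction f with
  | zero => intro q vis seen h; exact h
  | succ f ih =>
    intro q vis seen h
    cases q with
    | nil => exact h
    | cons p rest =>
      obtain ⟨x, y⟩ := p
      show VRel N M (bfsLoop N M ng (f + 1) ((x, y) :: rest) vis)
        (spreadLoop N M grid W (f + 1) ((x, y) :: rest) seen)
      rw [bfsLoop, spreadLoop]
      simp only [foldA_eq, foldB_eq]
      have s1 := step_sim N M ng grid W h0 (rest, vis) (rest, seen) rfl h
        (x + -1) (y + 0) (x - 1) y (by ring) (by ring)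
      have s2 := step_sim N M ng grid W h0 _ _ s1.1 s1.2 (x + 1) (y + 0) (x + 1) y rfl (by ring)
      have s3 := step_sim N M ng grid W h0 _ _ s2.1 s2.2 (x + 0) (y + -1) x (y - 1) (by ring) (by ring)
      have s4 := step_sim N M ng grid W h0 _ _ s3.1 s3.2 (x + 0) (y + 1) x (y + 1) (by ring) rfl
      rw [s4.1]
      exact ih _ _ _ s4.2

-- range(K) of Source B (ints) as A's Nat range
theorem pyr (K : Int) :
    PySem.List.pyRange 0 K 1 = (List.range K.toNat).map (fun (k : Nat) => (k : Int)) := by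
  rw [PySem.List.pyRange_one, show (K - 0).toNat = K.toNat by omega]
  exact List.map_congr_left (fun k _ => by ring)

-- the final safe-area counts agree once the visited structures are related
theorem count_eq (N M : Int) (ng grid : List (List Int)) (W : List (Int × Int))
    (h0 : ∀ i j : Int, 0 ≤ i → 0 ≤ j →
      (getCell ng i j = 0 ↔ (getCell grid i j = 0 ∧ List.contains W (i, j) = false)))
    (vis : List (List Bool)) (seen : PySem.Set (Int × Int)) (hrel : VRel N M vis seen) :
    ∀ (l : List Nat), (∀ i ∈ l, i < N.toNat) → ∀ (aA aB : Int), aA = aB →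
    l.foldl (fun a (i : Nat) =>
      (List.range M.toNat).foldl (fun a (j : Nat) =>
        if getCell ng (i : Int) (j : Int) = 0 ∧ getVis vis (i : Int) (j : Int) = false
        then a + 1 else a) a) aA
    = l.foldl (fun a (i : Nat) =>
      (List.range M.toNat).foldl (fun a (j : Nat) =>
        if getCell grid (i : Int) (j : Int) = 0 ∧ List.contains W ((i : Int), (j : Int)) = false ∧
           List.contains seen ((i : Int), (j : Int)) = false
        then a + 1 else a) a) aB := by
  intro l
  induction l with
  | nil => intro _ aA aB h; exact h
  | cons i l ihl =>
    intro hmem aA aB hab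
    have hiN : i < N.toNat := hmem i (by simp)
    have hinner : ∀ (m : List Nat), (∀ j ∈ m, j < M.toNat) → ∀ (aA aB : Int), aA = aB →
        m.foldl (fun a (j : Nat) =>
          if getCell ng (i : Int) (j : Int) = 0 ∧ getVis vis (i : Int) (j : Int) = false
          then a + 1 else a) aA
        = m.foldl (fun a (j : Nat) =>
          if getCell grid (i : Int) (j : Int) = 0 ∧ List.contains W ((i : Int), (j : Int)) = false ∧
             List.contains seen ((i : Int), (j : Int)) = false
          then a + 1 else a) aB := by
      intro m
      induction m with
      | nil => intro _ aA aB h; exact h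
      | cons j m ihm =>
        intro hjm aA aB hab
        have hjM : j < M.toNat := hjm j (by simp)
        have hvis : getVis vis (i : Int) (j : Int) = List.contains seen ((i : Int), (j : Int)) :=
          hrel.2.2 (i : Int) (j : Int) (by omega) (by omega) (by omega) (by omega)
        have hcond : (getCell ng (i : Int) (j : Int) = 0 ∧ getVis vis (i : Int) (j : Int) = false)
            ↔ (getCell grid (i : Int) (j : Int) = 0 ∧ List.contains W ((i : Int), (j : Int)) = false ∧
               List.contains seen ((i : Int), (j : Int)) = false) := by
          rw [h0 _ _ (by omega) (by omega), hvis]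
          tauto
        simp only [List.foldl_cons]
        by_cases hc : getCell ng (i : Int) (j : Int) = 0 ∧ getVis vis (i : Int) (j : Int) = false
        · rw [if_pos hc, if_pos (hcond.mp hc)]
          exact ihm (fun x hx => hjm x (by simp [hx])) _ _ (by omega)
        · rw [if_neg hc, if_neg (fun hb => hc (hcond.mpr hb))]
          exact ihm (fun x hx => hjm x (by simp [hx])) _ _ hab
    simp only [List.foldl_cons]
    exact ihl (fun x hx => hmem x (by simp [hx])) _ _
      (hinner (List.range M.toNat) (by simp) aA aB hab)

-- the whole spread step: A's bfs on the 3-wall copy = Source B's spread against the original grid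
theorem bridge (N M : Int) (grid : List (List Int)) (hR : Rect N M grid)
    (L : List (Int × Int)) (W : PySem.Set (Int × Int))
    (hL : ∀ w ∈ L, PIn N M w) (hL0 : ∀ w ∈ L, getCell grid w.1 w.2 = 0)
    (hW : ∀ p : Int × Int, p ∈ W ↔ p ∈ L) :
    bfs (stack L grid) N M = spreadB N M grid W := by
  have hcell := getCell_stack N M L grid hR hL
  have hWc : ∀ p : Int × Int, List.contains W p = decide (p ∈ L) := by
    intro p
    by_cases h : p ∈ L
    · have hw : p ∈ W := (hW p).mpr h
      rw [decide_eq_true h]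
      exact List.contains_iff_mem.mpr hw
    · have hw : p ∉ W := fun hh => h ((hW p).mp hh)
      rw [decide_eq_false h]
      exact Bool.eq_false_iff.mpr (fun hc => hw (List.contains_iff_mem.mp hc))
  have h0 : ∀ i j : Int, 0 ≤ i → 0 ≤ j →
      (getCell (stack L grid) i j = 0 ↔ (getCell grid i j = 0 ∧ List.contains W (i, j) = false)) := by
    intro i j hi hj
    rw [hcell i j hi hj, hWc]
    by_cases hm : (i, j) ∈ L
    · simp [hm]
    · simp [hm]
  have h2 : ∀ i j : Int, 0 ≤ i → 0 ≤ j →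
      (getCell (stack L grid) i j = 2 ↔ getCell grid i j = 2) := by
    intro i j hi hj
    rw [hcell i j hi hj]
    by_cases hm : (i, j) ∈ L
    · have h5 := hL0 (i, j) hm
      simp only [if_pos hm]
      constructor
      · intro h; omega
      · intro h
        dsimp only at h5
        omega
    · simp [hm]
  unfold bfs spreadB
  simp only [pyr, List.foldl_map, PySem.Set.contains]
  -- the initial virus scan builds equal queues and related visited structures
  have hinit : ∀ (l : List Nat),
      (∀ i ∈ l, i < N.toNat) →
      ∀ (stA : List (Int × Int) × List (List Bool)) (stB : List (Int × Int) × PySem.Set (Int × Int)),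
      stA.1 = stB.1 → VRel N M stA.2 stB.2 →
      (let rA := l.foldl (fun st (i : Nat) =>
          (List.range M.toNat).foldl (fun st (j : Nat) =>
            if getCell (stack L grid) (i : Int) (j : Int) = 2 then
              (st.1 ++ [((i : Int), (j : Int))], setVis st.2 (i : Int) (j : Int))
            else st) st) stA;
       let rB := l.foldl (fun st (i : Nat) =>
          (List.range M.toNat).foldl (fun st (j : Nat) =>
            if getCell grid (i : Int) (j : Int) = 2 then
              (st.1 ++ [((i : Int), (j : Int))], PySem.Set.add st.2 ((i : Int), (j : Int)))
            else st) st) stB;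
       rA.1 = rB.1 ∧ VRel N M rA.2 rB.2) := by
    intro l
    induction l with
    | nil => intro _ stA stB hq hrel; exact ⟨hq, hrel⟩
    | cons i l ihl =>
      intro hmem stA stB hq hrel
      have hiN : i < N.toNat := hmem i (by simp)
      have hinner : ∀ (m : List Nat), (∀ j ∈ m, j < M.toNat) →
          ∀ (stA : List (Int × Int) × List (List Bool)) (stB : List (Int × Int) × PySem.Set (Int × Int)),
          stA.1 = stB.1 → VRel N M stA.2 stB.2 →
          (let rA := m.foldl (fun st (j : Nat) =>
              if getCell (stack L grid) (i : Int) (j : Int) = 2 then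
                (st.1 ++ [((i : Int), (j : Int))], setVis st.2 (i : Int) (j : Int))
              else st) stA;
           let rB := m.foldl (fun st (j : Nat) =>
              if getCell grid (i : Int) (j : Int) = 2 then
                (st.1 ++ [((i : Int), (j : Int))], PySem.Set.add st.2 ((i : Int), (j : Int)))
              else st) stB;
           rA.1 = rB.1 ∧ VRel N M rA.2 rB.2) := by
        intro m
        induction m with
        | nil => intro _ stA stB hq hrel; exact ⟨hq, hrel⟩
        | cons j m ihm =>
          intro hjm stA stB hq hrel
          have hjM : j < M.toNat := hjm j (by simp)
          have hcond := h2 (i : Int) (j : Int) (by omega) (by omega)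
          simp only [List.foldl_cons]
          by_cases hc : getCell (stack L grid) (i : Int) (j : Int) = 2
          · rw [if_pos hc, if_pos (hcond.mp hc)]
            exact ihm (fun x hx => hjm x (by simp [hx])) _ _ (by simp [hq])
              (Rel_add N M stA.2 stB.2 hrel (i : Int) (j : Int) (by omega) (by omega) (by omega) (by omega))
          · rw [if_neg hc, if_neg (fun hb => hc (hcond.mpr hb))]
            exact ihm (fun x hx => hjm x (by simp [hx])) _ _ hq hrel
      have hstep := hinner (List.range M.toNat) (by simp) stA stB hq hrel
      simp only [List.foldl_cons]
      exact ihl (fun x hx => hmem x (by simp [hx])) _ _ hstep.1 hstep.2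
  have h := hinit (List.range N.toNat) (by simp) ([], List.replicate N.toNat (List.replicate M.toNat false))
    ([], PySem.Set.empty) rfl (Rel_empty N M)
  obtain ⟨hq0, hr0⟩ := h
  rw [hq0]
  exact count_eq N M (stack L grid) grid W h0 _ _
    (loop_sim N M (stack L grid) grid W h0 (N.toNat * M.toNat) _ _ _ hr0)
    (List.range N.toNat) (by simp) 0 0 rfl
-- ----- the empty-cell lists of the two ports are the same -----

theorem foldl_app_if {α β : Type} (p : α → Prop) [DecidablePred p] (f : α → β) :
    ∀ (l : List α) (acc : List β),
      l.foldl (fun acc x => if p x then acc ++ [f x] else acc) acc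
        = acc ++ l.filterMap (fun x => if p x then some (f x) else none) := by
  intro l
  induction l with
  | nil => intro acc; simp
  | cons a l ih =>
    intro acc
    by_cases h : p a
    · simp only [List.foldl_cons, if_pos h, ih, List.filterMap_cons, if_pos h]
      simp
    · simp only [List.foldl_cons, if_neg h, ih, List.filterMap_cons, if_neg h]

theorem empties_eq (N M : Int) (grid : List (List Int)) :
    (PySem.List.pyRange 0 N 1).flatMap (fun i =>
      (PySem.List.pyRange 0 M 1).filterMap (fun j =>
        if getCell grid i j = 0 then some (i, j) else none))
    = collectEmpties N M grid := by
  simp only [pyr, List.filterMap_map, List.flatMap_map]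
  unfold collectEmpties
  have houter : ∀ (l : List Nat) (acc : List (Int × Int)),
      l.foldl (fun acc (i : Nat) =>
        (List.range M.toNat).foldl (fun acc (j : Nat) =>
          if getCell grid (i : Int) (j : Int) = 0 then acc ++ [((i : Int), (j : Int))] else acc) acc) acc
      = acc ++ l.flatMap (fun (i : Nat) =>
          (List.range M.toNat).filterMap (fun (j : Nat) =>
            if getCell grid (i : Int) (j : Int) = 0 then some ((i : Int), (j : Int)) else none)) := by
    intro l
    induction l with
    | nil => intro acc; simp
    | cons i l ih =>
      intro acc
      simp only [List.foldl_cons, List.flatMap_cons]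
      rw [foldl_app_if (fun (j : Nat) => getCell grid (i : Int) (j : Int) = 0)
        (fun (j : Nat) => ((i : Int), (j : Int))) (List.range M.toNat) acc, ih]
      simp [List.append_assoc]
  rw [houter (List.range N.toNat) []]
  simp only [List.nil_append]
  rfl

theorem empties_mem (N M : Int) (grid : List (List Int)) :
    ∀ p ∈ collectEmpties N M grid, PIn N M p ∧ getCell grid p.1 p.2 = 0 := by
  intro p hp
  rw [← empties_eq] at hp
  simp only [List.mem_flatMap, List.mem_filterMap, PySem.List.mem_pyRange_one] at hp
  obtain ⟨i, ⟨hi0, hiN⟩, j, ⟨hj0, hjM⟩, hc⟩ := hp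
  by_cases h : getCell grid i j = 0
  · rw [if_pos h] at hc
    obtain rfl : (i, j) = p := by injection hc
    exact ⟨⟨hi0, hiN, hj0, hjM⟩, h⟩
  · rw [if_neg h] at hc
    exact absurd hc (by simp)

-- ----- the two enumerations of the C(E,3) wall triples -----

-- canonical "fold over the suffixes" shape both enumerations reduce to
def sfold (g : Int → (Int × Int) → List (Int × Int) → Int) : List (Int × Int) → Int → Int
  | [], a => a
  | p :: r, a => sfold g r (g a p r)

-- an index loop 'for t in range(s, len(es))' whose body reads es[t] and es[t+1:] is the
-- suffix fold over es.drop s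
theorem foldIdx (es : List (Int × Int)) (f : Int → Nat → Int)
    (g : Int → (Int × Int) → List (Int × Int) → Int)
    (hfg : ∀ (a : Int) (t : Nat) (h : t < es.length), f a t = g a es[t] (es.drop (t + 1))) :
    ∀ (s : Nat) (acc : Int),
      (List.range' s (es.length - s)).foldl f acc = sfold g (es.drop s) acc := by
  intro s acc
  suffices h : ∀ (n s : Nat) (acc : Int), es.length - s = n →
      (List.range' s (es.length - s)).foldl f acc = sfold g (es.drop s) acc from
    h (es.length - s) s acc rfl
  intro n
  induction n with
  | zero =>
    intro s acc h
    rw [h, List.drop_of_length_le (by omega)]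
    rfl
  | succ m ih =>
    intro s acc h
    have hs : s < es.length := by omega
    rw [h, List.range'_succ, List.drop_eq_getElem_cons hs]
    simp only [List.foldl_cons, sfold]
    rw [hfg acc s hs, show m = es.length - (s + 1) by omega]
    exact ih (s + 1) _ (by omega)

theorem bestLoop_max (N M : Int) (grid : List (List Int)) (n : Nat)
    (walls : PySem.Set (Int × Int)) :
    ∀ (l : List (Int × Int)) (a b : Int),
      bestLoop N M grid n walls l (max a b) = max a (bestLoop N M grid n walls l b) := by
  intro l
  induction l with
  | nil => intro a b; simp [bestLoop]
  | cons p r ih =>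
    intro a b
    rw [bestLoop, bestLoop, max_assoc, ih]

theorem bestLoop_thread (N M : Int) (grid : List (List Int)) (n : Nat)
    (walls : PySem.Set (Int × Int)) (l : List (Int × Int)) (a : Int) (ha : 0 ≤ a) :
    bestLoop N M grid n walls l a = max a (bestLoop N M grid n walls l 0) := by
  rw [← bestLoop_max]
  congr 1
  exact (max_eq_left ha).symm

theorem bestFrom_zero (N M : Int) (grid : List (List Int)) (r : List (Int × Int))
    (walls : PySem.Set (Int × Int)) :
    bestFrom N M grid 0 r walls = spreadB N M grid walls := by rw [bestFrom]

theorem bestFrom_succ (N M : Int) (grid : List (List Int)) (n : Nat) (r : List (Int × Int))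
    (walls : PySem.Set (Int × Int)) :
    bestFrom N M grid (n + 1) r walls = bestLoop N M grid n walls r 0 := by rw [bestFrom]

-- a cell the enumeration may pick: in range and empty in the ORIGINAL grid
def Good (N M : Int) (grid : List (List Int)) (p : Int × Int) : Prop :=
  PIn N M p ∧ getCell grid p.1 p.2 = 0

theorem hW_add (L : List (Int × Int)) (W : PySem.Set (Int × Int))
    (hW : ∀ p : Int × Int, p ∈ W ↔ p ∈ L) (x : Int × Int) :
    ∀ p : Int × Int, p ∈ PySem.Set.add W x ↔ p ∈ L ++ [x] := by
  intro p
  rw [PySem.Set.mem_add, List.mem_append, List.mem_singleton, hW]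

-- innermost loop (third wall) = the need = 0 level of the backtracking
theorem lvl3 (N M : Int) (grid : List (List Int)) (hR : Rect N M grid) :
    ∀ (l : List (Int × Int)), (∀ p ∈ l, Good N M grid p) →
    ∀ (L : List (Int × Int)) (W : PySem.Set (Int × Int)),
      (∀ w ∈ L, Good N M grid w) → (∀ p : Int × Int, p ∈ W ↔ p ∈ L) →
    ∀ (acc : Int),
      sfold (fun a z _ => max a (bfs (stack (L ++ [z]) grid) N M)) l acc
        = bestLoop N M grid 0 W l acc := by
  intro l
  induction l with
  | nil => intro _ L W _ _ acc; rw [bestLoop]; rfl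
  | cons p r ih =>
    intro hl L W hLg hW acc
    have hp := hl p (by simp)
    have hbr : bfs (stack (L ++ [p]) grid) N M = spreadB N M grid (PySem.Set.add W p) := by
      refine bridge N M grid hR (L ++ [p]) (PySem.Set.add W p) ?_ ?_ (hW_add L W hW p)
      · intro w hw
        rcases List.mem_append.mp hw with h | h
        · exact (hLg w h).1
        · rw [List.mem_singleton.mp h]; exact hp.1
      · intro w hw
        rcases List.mem_append.mp hw with h | h
        · exact (hLg w h).2
        · rw [List.mem_singleton.mp h]; exact hp.2
    rw [sfold, bestLoop]
    rw [bestFrom_zero N M grid r (PySem.Set.add W p)]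
    rw [← hbr]
    exact ih (fun x hx => hl x (by simp [hx])) L W hLg hW _

-- middle loop (second wall) = the need = 1 level
theorem lvl2 (N M : Int) (grid : List (List Int)) (hR : Rect N M grid) :
    ∀ (l : List (Int × Int)), (∀ p ∈ l, Good N M grid p) →
    ∀ (L : List (Int × Int)) (W : PySem.Set (Int × Int)),
      (∀ w ∈ L, Good N M grid w) → (∀ p : Int × Int, p ∈ W ↔ p ∈ L) →
    ∀ (acc : Int), 0 ≤ acc →
      sfold (fun a y r =>
        sfold (fun a' z _ => max a' (bfs (stack ((L ++ [y]) ++ [z]) grid) N M)) r a) l acc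
        = bestLoop N M grid 1 W l acc := by
  intro l
  induction l with
  | nil => intro _ L W _ _ acc _; rw [bestLoop]; rfl
  | cons p r ih =>
    intro hl L W hLg hW acc hacc
    have hp := hl p (by simp)
    have hLg' : ∀ w ∈ L ++ [p], Good N M grid w := by
      intro w hw
      rcases List.mem_append.mp hw with h | h
      · exact hLg w h
      · rw [List.mem_singleton.mp h]; exact hp
    have hr : ∀ x ∈ r, Good N M grid x := fun x hx => hl x (by simp [hx])
    rw [sfold, bestLoop]
    rw [lvl3 N M grid hR r hr (L ++ [p]) (PySem.Set.add W p) hLg' (hW_add L W hW p) acc]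
    rw [bestFrom_succ N M grid 0 r (PySem.Set.add W p)]
    rw [bestLoop_thread N M grid 0 (PySem.Set.add W p) r acc hacc]
    exact ih hr L W hLg hW _ (le_trans hacc (le_max_left _ _))

-- outer loop (first wall) = the need = 2 level
theorem lvl1 (N M : Int) (grid : List (List Int)) (hR : Rect N M grid) :
    ∀ (l : List (Int × Int)), (∀ p ∈ l, Good N M grid p) →
    ∀ (L : List (Int × Int)) (W : PySem.Set (Int × Int)),
      (∀ w ∈ L, Good N M grid w) → (∀ p : Int × Int, p ∈ W ↔ p ∈ L) →
    ∀ (acc : Int), 0 ≤ acc →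
      sfold (fun a x r =>
        sfold (fun a' y r' =>
          sfold (fun a'' z _ =>
            max a'' (bfs (stack (((L ++ [x]) ++ [y]) ++ [z]) grid) N M)) r' a') r a) l acc
        = bestLoop N M grid 2 W l acc := by
  intro l
  induction l with
  | nil => intro _ L W _ _ acc _; rw [bestLoop]; rfl
  | cons p r ih =>
    intro hl L W hLg hW acc hacc
    have hp := hl p (by simp)
    have hLg' : ∀ w ∈ L ++ [p], Good N M grid w := by
      intro w hw
      rcases List.mem_append.mp hw with h | h
      · exact hLg w h
      · rw [List.mem_singleton.mp h]; exact hp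
    have hr : ∀ x ∈ r, Good N M grid x := fun x hx => hl x (by simp [hx])
    rw [sfold, bestLoop]
    rw [lvl2 N M grid hR r hr (L ++ [p]) (PySem.Set.add W p) hLg' (hW_add L W hW p) acc hacc]
    rw [bestFrom_succ N M grid 1 r (PySem.Set.add W p)]
    rw [bestLoop_thread N M grid 1 (PySem.Set.add W p) r acc hacc]
    exact ih hr L W hLg hW _ (le_trans hacc (le_max_left _ _))

theorem solve_eq_alt (N M : Int) (grid : List (List Int)) (hpre : Pre_solve N M grid) :
    solve N M grid = solve_alt N M grid := by
  by_cases hM : M ≤ 0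
  · -- every column loop is over range(M) = [] : both programs return 0 without touching the grid
    have hM0 : M.toNat = 0 := by omega
    have hpy : PySem.List.pyRange 0 M 1 = [] := PySem.List.pyRange_one_eq_nil (by omega)
    have hes : collectEmpties N M grid = [] := by
      unfold collectEmpties
      rw [hM0]
      simp
    have hfm : List.flatMap (fun i : Int => ([] : List (Int × Int))) (PySem.List.pyRange 0 N 1)
        = [] := by simp
    simp only [solve, solve_alt, hes, hpy, List.filterMap_nil, hfm, bestFrom_succ]
    rw [bestLoop]
    simp
  have hR := Rect_of_pre N M grid hpre (by omega)
  simp only [solve, solve_alt]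
  rw [empties_eq N M grid]
  set es := collectEmpties N M grid with hes
  have hgood : ∀ p ∈ es, Good N M grid p := fun p hp => empties_mem N M grid p hp
  -- innermost index loop → sfold, for fixed x y
  have h3 : ∀ (x y : Int × Int) (s : Nat) (acc : Int),
      (List.range' s (es.length - s)).foldl (fun a k =>
        max a (bfs (setCell (setCell (setCell grid x.1 x.2 1) y.1 y.2 1)
          (es.getD k (0, 0)).1 (es.getD k (0, 0)).2 1) N M)) acc
        = sfold (fun a z _ =>
            max a (bfs (setCell (setCell (setCell grid x.1 x.2 1) y.1 y.2 1) z.1 z.2 1) N M))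
            (es.drop s) acc := by
    intro x y
    exact foldIdx es _ _ (fun a t ht => by rw [List.getD_eq_getElem es (0, 0) ht])
  -- middle index loop → sfold, for fixed x
  have h2 : ∀ (x : Int × Int) (s : Nat) (acc : Int),
      (List.range' s (es.length - s)).foldl (fun a j =>
        (List.range' (j + 1) (es.length - (j + 1))).foldl (fun a' k =>
          max a' (bfs (setCell (setCell (setCell grid x.1 x.2 1)
            (es.getD j (0, 0)).1 (es.getD j (0, 0)).2 1)
            (es.getD k (0, 0)).1 (es.getD k (0, 0)).2 1) N M)) a) acc
        = sfold (fun a y r =>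
            sfold (fun a' z _ =>
              max a' (bfs (setCell (setCell (setCell grid x.1 x.2 1) y.1 y.2 1) z.1 z.2 1) N M))
              r a) (es.drop s) acc := by
    intro x
    refine foldIdx es _ _ (fun a t ht => ?_)
    rw [List.getD_eq_getElem es (0, 0) ht]
    exact h3 x es[t] (t + 1) a
  -- outer index loop → sfold
  have h1 : ∀ (s : Nat) (acc : Int),
      (List.range' s (es.length - s)).foldl (fun a i =>
        (List.range' (i + 1) (es.length - (i + 1))).foldl (fun a' j =>
          (List.range' (j + 1) (es.length - (j + 1))).foldl (fun a'' k =>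
            max a'' (bfs (setCell (setCell (setCell grid
              (es.getD i (0, 0)).1 (es.getD i (0, 0)).2 1)
              (es.getD j (0, 0)).1 (es.getD j (0, 0)).2 1)
              (es.getD k (0, 0)).1 (es.getD k (0, 0)).2 1) N M)) a') a) acc
        = sfold (fun a x r =>
            sfold (fun a' y r' =>
              sfold (fun a'' z _ =>
                max a'' (bfs (setCell (setCell (setCell grid x.1 x.2 1) y.1 y.2 1) z.1 z.2 1) N M))
                r' a') r a) (es.drop s) acc := by
    refine foldIdx es _ _ (fun a t ht => ?_)
    rw [List.getD_eq_getElem es (0, 0) ht]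
    exact h2 es[t] (t + 1) a
  have h0 := h1 0 0
  simp only [Nat.sub_zero, List.drop_zero] at h0
  rw [List.range_eq_range', h0]
  rw [bestFrom_succ N M grid 2 es PySem.Set.empty]
  exact lvl1 N M grid hR es hgood [] PySem.Set.empty (by simp)
    (fun p => by simp [PySem.Set.empty]) 0 le_rfl

-- ===== VERDICT (by name: the statement is the Claim_ definition above) =====
theorem solve_spec : Claim_equal_solve := by
  intro N M grid _ hpre
  unfold Spec_solve
  exact solve_eq_alt N M grid hpre
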